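-- pv_equiv track=rewrite | github.com/tharitthaveekittikul/LLMSystemTrading | backend/mt5/bridge.py | resolve_broker_symbol
-- ===== SOURCE A (Python) =====
-- def resolve_broker_symbol(base: str, broker_symbols: list[str]) -> str:
--     """Find the broker's actual symbol name for a bare name like 'EURUSD'.
--
--     Brokers commonly add suffixes or prefixes to instrument names
--     (e.g. 'EURUSD.s', 'EURUSDm', 'GOLD.raw'). This method resolves the
--     bare strategy symbol to the name the connected broker actually exposes.
--
--     Matching priority (first match wins):
--         1. Exact match          — 'EURUSD'  in broker_symbols
--         2. Shortest prefix      — broker symbol starts with base name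
--         3. Shortest substring   — base name appears anywhere in broker symbol
--         4. Return base unchanged (caller should log a warning)
--
--     Args:
--         base: The bare symbol name stored in the strategy config.
--         broker_symbols: Full list of symbols returned by the broker.
--
--     Returns:
--         The resolved broker symbol, or *base* if no match is found.
--     """
--     if base in broker_symbols:
--         return base
--
--     # Priority 2: prefix match (e.g. EURUSD.s, EURUSDm)
--     prefix_matches = [s for s in broker_symbols if s.startswith(base)]
--     if prefix_matches:
--         return min(prefix_matches, key=len)
--
--     # Priority 3: substring / suffix match (e.g. XAU → XAUUSD.s)
--     sub_matches = [s for s in broker_symbols if base in s]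
--     if sub_matches:
--         return min(sub_matches, key=len)
--
--     return base
-- ===== SOURCE B (Python) =====
-- def resolve_broker_symbol(base: str, broker_symbols: list[str]) -> str:
--     """Single pass: track shortest prefix match and shortest substring match,
--     early-return on an exact hit; strict < keeps the first shortest (min's tie rule)."""
--     best_prefix = None
--     best_sub = None
--     for s in broker_symbols:
--         if s == base:
--             return base
--         if s.startswith(base) and (best_prefix is None or len(s) < len(best_prefix)):
--             best_prefix = s
--         if base in s and (best_sub is None or len(s) < len(best_sub)):
--             best_sub = s
--     if best_prefix is not None:
--         return best_prefix
--     if best_sub is not None: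
--         return best_sub
--     return base
-- ===== Notes on version B (the rewrite author's own statement) =====
-- stated objective: alternative
-- what changed: Replaces the membership test plus two full list-comprehension scans with min(...) by one single loop that early-returns on an exact hit and tracks the shortest prefix and shortest substring candidates with strict-< updates.
import Mathlib
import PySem

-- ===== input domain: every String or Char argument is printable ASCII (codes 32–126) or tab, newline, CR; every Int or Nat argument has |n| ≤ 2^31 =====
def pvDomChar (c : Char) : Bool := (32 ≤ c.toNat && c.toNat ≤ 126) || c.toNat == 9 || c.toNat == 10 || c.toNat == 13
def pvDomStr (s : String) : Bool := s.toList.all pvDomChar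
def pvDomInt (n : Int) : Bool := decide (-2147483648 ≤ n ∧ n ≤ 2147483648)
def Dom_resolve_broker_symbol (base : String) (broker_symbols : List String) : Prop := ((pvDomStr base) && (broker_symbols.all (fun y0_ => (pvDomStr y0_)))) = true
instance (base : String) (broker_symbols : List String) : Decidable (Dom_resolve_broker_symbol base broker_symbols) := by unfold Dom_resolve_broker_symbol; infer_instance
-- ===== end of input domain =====

-- B replaces A's three separate scans (membership, prefix filter+min, substring filter+min)
-- by one loop tracking the shortest prefix/substring candidates; same result, proved equal.


-- ===== PORT A =====
def resolve_broker_symbol (base : String) (broker_symbols : List String) : String :=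
  if broker_symbols.contains base then base
  else
    -- prefix_matches = [s for s in broker_symbols if s.startswith(base)]; if nonempty, min by len
    match PySem.List.min? (broker_symbols.filter (fun s => PySem.Str.startswith s base)) PySem.Str.len with
    | some m => m
    | none =>
      -- sub_matches = [s for s in broker_symbols if base in s]; if nonempty, min by len
      match PySem.List.min? (broker_symbols.filter (fun s => PySem.Str.isIn base s)) PySem.Str.len with
      | some m => m
      | none => base

-- ===== PORT B =====
-- one pass: early return on exact match, strict-< updates of best_prefix / best_sub
def rbsLoop (base : String) : List String → Option String → Option String → String
  | [], bp, bs =>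
    match bp with
    | some p => p
    | none => match bs with
      | some q => q
      | none => base
  | s :: rest, bp, bs =>
    if s == base then base
    else
      let bp' := if PySem.Str.startswith s base &&
                    (match bp with | none => true | some p => decide (PySem.Str.len s < PySem.Str.len p))
                 then some s else bp
      let bs' := if PySem.Str.isIn base s &&
                    (match bs with | none => true | some q => decide (PySem.Str.len s < PySem.Str.len q))
                 then some s else bs
      rbsLoop base rest bp' bs'

def resolve_broker_symbol_alt (base : String) (broker_symbols : List String) : String :=
  rbsLoop base broker_symbols none none

-- ===== PRECONDITION & SPEC =====
def Spec_resolve_broker_symbol (base : String) (broker_symbols : List String) (out : String) : Prop := out = resolve_broker_symbol_alt base broker_symbols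
instance (base : String) (broker_symbols : List String) (out : String) : Decidable (Spec_resolve_broker_symbol base broker_symbols out) := by unfold Spec_resolve_broker_symbol; infer_instance

-- ===== CLAIM (what is proved, stated in full; the proofs are below) =====
def Claim_equal_resolve_broker_symbol : Prop := ∀ (base : String) (broker_symbols : List String), Dom_resolve_broker_symbol base broker_symbols → Spec_resolve_broker_symbol base broker_symbols (resolve_broker_symbol base broker_symbols)

-- ===== LEMMAS AND PROOFS =====

-- the foldl step underlying PySem.List.min? with key = len (first-shortest-wins)
def rbsStep (acc : Option String) (x : String) : Option String :=
  match acc with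
  | none => some x
  | some m => if PySem.Str.len x < PySem.Str.len m then some x else some m

theorem min?_len_eq_foldl (xs : List String) :
    PySem.List.min? xs PySem.Str.len = xs.foldl rbsStep none := by
  unfold PySem.List.min?
  congr 1
  funext acc x
  cases acc <;> rfl

theorem rbsLoop_spec (base : String) (l : List String) (bp bs : Option String) :
    rbsLoop base l bp bs =
      if base ∈ l then base
      else
        match (l.filter (fun s => PySem.Str.startswith s base)).foldl rbsStep bp with
        | some p => p
        | none =>
          match (l.filter (fun s => PySem.Str.isIn base s)).foldl rbsStep bs with
          | some q => q
          | none => base := by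
  induction l generalizing bp bs with
  | nil => simp [rbsLoop]
  | cons x rest ih =>
    by_cases hx : x = base
    · subst hx
      simp [rbsLoop]
    · have hbeq : (x == base) = false := by simp [hx]
      have hmem : (base ∈ x :: rest) ↔ (base ∈ rest) := by
        constructor
        · intro h
          rcases List.mem_cons.mp h with h' | h'
          · exact absurd h'.symm hx
          · exact h'
        · exact fun h => List.mem_cons_of_mem _ h
      conv_lhs => rw [rbsLoop.eq_def]
      simp only [hbeq, Bool.false_eq_true, if_false]
      rw [ih]
      have hbp : (if PySem.Str.startswith x base &&
              (match bp with | none => true | some p => decide (PySem.Str.len x < PySem.Str.len p))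
            then some x else bp)
          = (if PySem.Str.startswith x base then rbsStep bp x else bp) := by
        cases bp <;> by_cases hp : PySem.Str.startswith x base = true <;> simp [rbsStep] <;> split <;> simp_all
      have hbs : (if PySem.Str.isIn base x &&
              (match bs with | none => true | some q => decide (PySem.Str.len x < PySem.Str.len q))
            then some x else bs)
          = (if PySem.Str.isIn base x then rbsStep bs x else bs) := by
        cases bs <;> by_cases hq : PySem.Str.isIn base x = true <;> simp [rbsStep] <;> split <;> simp_all
      rw [hbp, hbs]
      by_cases hm : base ∈ rest
      · simp [hm, hmem]
      · have hmem' : (base ∈ x :: rest) = False := by simp [hmem, hm]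
        simp only [hm, if_false, hmem']
        by_cases hp : PySem.Chars.startswith x.toList base.toList = true <;>
          by_cases hq : PySem.Chars.isIn base.toList x.toList = true <;>
            simp [hp, hq, PySem.Str.startswith, PySem.Str.isIn]

-- ===== VERDICT (by name: the statement is the Claim_ definition above) =====
theorem resolve_broker_symbol_spec : Claim_equal_resolve_broker_symbol := by
  intro base l _
  unfold Spec_resolve_broker_symbol resolve_broker_symbol resolve_broker_symbol_alt
  rw [rbsLoop_spec, min?_len_eq_foldl, min?_len_eq_foldl]
  by_cases hm : base ∈ l
  · simp [hm]
  · simp [hm]
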